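-- pv_equiv track=rewrite | github.com/jedel1043/slurm-charms | charms/slurmd/src/charm.py | _ranges_and_strides
-- ===== SOURCE A (Python) =====
-- import itertools
--
-- def _ranges_and_strides(nums) -> str:
--     """Return ranges and strides for given iterable.
--
--     Requires input elements to be unique and sorted ascending.
--
--     Returns:
--         A square-bracketed string with comma-separated ranges of consecutive values.
--
--         example_input  = [0,1,2,3,4,5,6,8,9,10,12,14,15,16,18]
--         example_output = '[0-6,8-10,12,14-16,18]'
--     """
--     out = "["
--
--     # The input is enumerate()-ed to produce a list of tuples of the elements and their indices.
--     # groupby() uses the lambda key function to group these tuples by the difference between the element and index.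
--     # Consecutive values have equal difference between element and index, so are grouped together.
--     # Hence, the elements of the first and last members of each group give the range of consecutive values.
--     # If the group has only a single member, there are no consecutive values either side of it (a "stride").
--     for _, group in itertools.groupby(enumerate(nums), lambda elems: elems[1] - elems[0]):
--         group = list(group)
--
--         if len(group) == 1:
--             # Single member, this is a stride.
--             out += f"{group[0][1]},"
--         else:
--             # Range of consecutive values is first-last in group.
--             out += f"{group[0][1]}-{group[-1][1]},"
--
--     out = out.rstrip(",") + "]"
--     return out
-- ===== SOURCE B (Python) =====
-- def _ranges_and_strides(nums) -> str:
--     """Return ranges and strides for given iterable (see original docstring).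
--
--     Boundary-pair algorithm: zip the list with its tail to find every adjacent
--     pair (a, b) with b != a + 1 (the "breaks"); the run starts are the first
--     element plus each break's right component, the run ends are each break's
--     left component plus the last element; zip starts with ends and render.
--     """
--     nums = list(nums)
--     if not nums:
--         return "[]"
--     breaks = [(a, b) for a, b in zip(nums, nums[1:]) if b != a + 1]
--     starts = [nums[0]] + [b for _, b in breaks]
--     ends = [a for a, _ in breaks] + [nums[-1]]
--     parts = [f"{a}" if a == b else f"{a}-{b}" for a, b in zip(starts, ends)]
--     return "[" + ",".join(parts) + "]"
-- ===== Notes on version B (the rewrite author's own statement) =====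
-- stated objective: alternative
-- what changed: Replaces the groupby(enumerate)-by-index-difference streaming accumulation with a boundary-pair algorithm: zip the list with its tail to collect every break pair (a,b) with b != a+1, derive the starts list and the ends list as two projections of those breaks, then zip starts with ends and render; measured ~2x faster (constant factor) by dropping enumerate/groupby/per-group list materialization and the rstrip.
import Mathlib
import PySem

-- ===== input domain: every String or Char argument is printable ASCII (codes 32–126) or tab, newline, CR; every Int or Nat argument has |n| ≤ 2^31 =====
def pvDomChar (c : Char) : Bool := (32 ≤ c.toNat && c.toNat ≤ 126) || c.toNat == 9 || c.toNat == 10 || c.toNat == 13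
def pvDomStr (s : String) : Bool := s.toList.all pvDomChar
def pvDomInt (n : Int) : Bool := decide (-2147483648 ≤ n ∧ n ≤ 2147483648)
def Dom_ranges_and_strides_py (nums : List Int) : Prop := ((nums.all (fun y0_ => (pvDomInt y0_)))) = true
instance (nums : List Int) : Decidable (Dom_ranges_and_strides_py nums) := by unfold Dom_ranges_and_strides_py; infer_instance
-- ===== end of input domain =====

-- B replaces the groupby(enumerate)-by-index-difference accumulation with a boundary-pair
-- algorithm (break pairs from zipping the list with its tail, then starts zipped with ends);
-- objective: alternative decomposition; equivalence is exact on all inputs.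

-- ===== PORT A =====
-- itertools.groupby(enumerate(nums), key = elem - index): consecutive members with equal key form a group.
def pyGroupsA (l : List (Int × Int)) : List (List (Int × Int)) :=
  match l with
  | [] => []
  | p :: rest =>
    (p :: rest.takeWhile (fun q => q.2 - q.1 == p.2 - p.1)) ::
      pyGroupsA (rest.dropWhile (fun q => q.2 - q.1 == p.2 - p.1))
termination_by l.length
decreasing_by
  have := List.length_dropWhile_le (fun q : Int × Int => q.2 - q.1 == p.2 - p.1) rest
  simp; omega

-- the loop body: group[0][1] / group[-1][1] on the (never empty) materialized group
def renderGroupA (g : List (Int × Int)) : List Char :=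
  if g.length = 1 then PySem.Int.toChars (g.headD (0, 0)).2 ++ [',']
  else PySem.Int.toChars (g.headD (0, 0)).2 ++ ['-'] ++ PySem.Int.toChars (g.getLastD (0, 0)).2 ++ [',']

-- hand port of str.rstrip(","): drop every trailing ',' (exact for this one-char chars argument)
def rstripCommas (cs : List Char) : List Char := (cs.reverse.dropWhile (· == ',')).reverse

def ranges_and_strides_py (nums : List Int) : String :=
  String.ofList (rstripCommas ((pyGroupsA (PySem.List.enumerate nums 0)).foldl
    (fun out g => out ++ renderGroupA g) ['[']) ++ [']'])

-- ===== PORT B =====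
-- f"{a}" if a == b else f"{a}-{b}"
def renderPart (a b : Int) : List Char :=
  if a = b then PySem.Int.toChars a else PySem.Int.toChars a ++ ['-'] ++ PySem.Int.toChars b

-- [(a, b) for a, b in zip(nums, nums[1:]) if b != a + 1]
def breaksB (l : List Int) : List (Int × Int) :=
  (l.zip l.tail).filter (fun p => p.2 != p.1 + 1)

def ranges_and_strides_py_alt : List Int → String
  | [] => "[]"
  | x :: xs =>
    let bs := breaksB (x :: xs)
    let starts := x :: bs.map Prod.snd
    -- nums[-1] on the non-empty list = getLastD
    let ends := bs.map Prod.fst ++ [(x :: xs).getLastD 0]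
    String.ofList ('[' :: PySem.Chars.join [',']
      ((starts.zip ends).map (fun r => renderPart r.1 r.2)) ++ [']'])

-- ===== PRECONDITION & SPEC =====
def Spec_ranges_and_strides_py (nums : List Int) (out : String) : Prop := out = ranges_and_strides_py_alt nums
instance (nums : List Int) (out : String) : Decidable (Spec_ranges_and_strides_py nums out) := by unfold Spec_ranges_and_strides_py; infer_instance

-- ===== CLAIM (what is proved, stated in full; the proofs are below) =====
def Claim_equal_ranges_and_strides_py : Prop := ∀ (nums : List Int), Dom_ranges_and_strides_py nums → Spec_ranges_and_strides_py nums (ranges_and_strides_py nums)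

-- ===== LEMMAS AND PROOFS =====

-- the maximal consecutive run following previous value p, and the rest of the list
def takeRun (p : Int) : List Int → List Int
  | [] => []
  | x :: xs => if x = p + 1 then x :: takeRun x xs else []

def dropRun (p : Int) : List Int → List Int
  | [] => []
  | x :: xs => if x = p + 1 then dropRun x xs else x :: xs

-- the (start, end) runs both programs describe
def runsFrom (s p : Int) : List Int → List (Int × Int)
  | [] => [(s, p)]
  | x :: xs => if x = p + 1 then runsFrom s x xs else (s, p) :: runsFrom x x xs

theorem length_dropRun_le (p : Int) (xs : List Int) : (dropRun p xs).length ≤ xs.length := by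
  induction xs generalizing p with
  | nil => simp [dropRun]
  | cons x xs ih =>
    simp only [dropRun]
    split
    · exact Nat.le_trans (ih x) (Nat.le_succ _)
    · simp

theorem takeRun_gt (xs : List Int) (p y : Int) (h : y ∈ takeRun p xs) : p < y := by
  induction xs generalizing p with
  | nil => simp [takeRun] at h
  | cons x xs ih =>
    simp only [takeRun] at h
    split at h
    · rcases List.mem_cons.mp h with h | h
      · omega
      · have := ih x h; omega
    · simp at h

theorem getLastD_mem (l : List Int) (x : Int) (h : l ≠ []) : l.getLastD x ∈ l := by
  induction l generalizing x with
  | nil => cases h rfl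
  | cons a t ih =>
    rw [List.getLastD_cons]
    cases t with
    | nil => simp
    | cons b t' => exact List.mem_cons_of_mem _ (ih _ (by simp))

theorem runsFrom_ne_nil (xs : List Int) (s p : Int) : runsFrom s p xs ≠ [] := by
  induction xs generalizing s p with
  | nil => simp [runsFrom]
  | cons x xs ih => simp only [runsFrom]; split <;> simp [ih]

theorem runsFrom_eq (xs : List Int) (s p : Int) :
    runsFrom s p xs = (s, (takeRun p xs).getLastD p) ::
      (match dropRun p xs with | [] => [] | y :: ys => runsFrom y y ys) := by
  induction xs generalizing s p with
  | nil => simp [runsFrom, takeRun, dropRun]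
  | cons x xs ih =>
    by_cases h : x = p + 1
    · simp only [runsFrom, takeRun, dropRun, if_pos h, List.getLastD_cons]
      exact ih s x
    · simp [runsFrom, takeRun, dropRun, h]

-- B's starts zipped with B's ends are exactly the runs
theorem zip_breaks_eq_runs (xs : List Int) (s p : Int) :
    (s :: (breaksB (p :: xs)).map Prod.snd).zip
      ((breaksB (p :: xs)).map Prod.fst ++ [(p :: xs).getLastD 0]) = runsFrom s p xs := by
  induction xs generalizing s p with
  | nil => simp [breaksB, runsFrom]
  | cons y ys ih =>
    by_cases h : y = p + 1
    · have hb : ((p, y).2 != (p, y).1 + 1) = false := by simp [h]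
      simp only [breaksB, List.tail_cons, List.zip_cons_cons, List.filter_cons, hb,
        Bool.false_eq_true, if_false, runsFrom, if_pos h, List.getLastD_cons]
      simpa only [breaksB, List.tail_cons, List.getLastD_cons] using ih s y
    · have hb : ((p, y).2 != (p, y).1 + 1) = true := by simp [h]
      simp only [breaksB, List.tail_cons, List.zip_cons_cons, List.filter_cons, hb, if_true,
        List.map_cons, runsFrom, if_neg h, List.getLastD_cons, List.cons_append,
        List.zip_cons_cons]
      congr 1
      simpa only [breaksB, List.tail_cons, List.getLastD_cons] using ih y y

theorem enumerate_takeDrop (xs : List Int) (i p c : Int) (hc : c = p - i + 1) :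
    (PySem.List.enumerate xs i).takeWhile (fun q => q.2 - q.1 == c)
      = PySem.List.enumerate (takeRun p xs) i ∧
    (PySem.List.enumerate xs i).dropWhile (fun q => q.2 - q.1 == c)
      = PySem.List.enumerate (dropRun p xs) (i + (takeRun p xs).length) := by
  induction xs generalizing i p c with
  | nil => simp [PySem.List.enumerate_nil, takeRun, dropRun]
  | cons y xs ih =>
    rw [PySem.List.enumerate_cons]
    simp only [List.takeWhile_cons, List.dropWhile_cons]
    by_cases hy : y = p + 1
    · have hb : (((i, y) : Int × Int).2 - (i, y).1 == c) = true := by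
        simp only [beq_iff_eq]; omega
      obtain ⟨h1, h2⟩ := ih (i + 1) y c (by omega)
      rw [hb, if_pos rfl, if_pos rfl, h1, h2]
      simp only [takeRun, dropRun, if_pos hy]
      refine ⟨by rw [PySem.List.enumerate_cons], ?_⟩
      congr 1
      push_cast [List.length_cons]
      ring
    · have hb : (((i, y) : Int × Int).2 - (i, y).1 == c) = false := by
        simp only [beq_eq_false_iff_ne, ne_eq]; omega
      rw [hb]
      simp [takeRun, dropRun, hy, PySem.List.enumerate_cons]

theorem getLastD_enumerate_snd (l : List Int) (i : Int) (d : Int × Int) :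
    ((PySem.List.enumerate l i).getLastD d).2 = l.getLastD d.2 := by
  induction l generalizing i d with
  | nil => simp [PySem.List.enumerate_nil]
  | cons y l ih => rw [PySem.List.enumerate_cons, List.getLastD_cons, ih, List.getLastD_cons]

theorem renderGroup_of_run (xs : List Int) (x i : Int) :
    renderGroupA ((i, x) :: PySem.List.enumerate (takeRun x xs) (i + 1))
      = renderPart x ((takeRun x xs).getLastD x) ++ [','] := by
  by_cases htr : takeRun x xs = []
  · simp [htr, renderGroupA, renderPart, PySem.List.enumerate_nil]
  · have hlen : ((i, x) :: PySem.List.enumerate (takeRun x xs) (i + 1)).length ≠ 1 := by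
      simp [PySem.List.length_enumerate]
      exact htr
    have hne : x ≠ (takeRun x xs).getLastD x := by
      have hm : (takeRun x xs).getLastD x ∈ takeRun x xs := getLastD_mem _ _ htr
      have := takeRun_gt xs x _ hm
      omega
    have hlast : (((i, x) :: PySem.List.enumerate (takeRun x xs) (i + 1)).getLastD (0, 0)).2
        = (takeRun x xs).getLastD x := by
      rw [← PySem.List.enumerate_cons, getLastD_enumerate_snd, List.getLastD_cons]
    simp only [renderGroupA, if_neg hlen, renderPart, if_neg hne, hlast]
    simp

theorem groupsA_eq_runs (n : Nat) (xs : List Int) (x i : Int) (hn : xs.length ≤ n) :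
    (pyGroupsA (PySem.List.enumerate (x :: xs) i)).map renderGroupA
      = (runsFrom x x xs).map (fun r => renderPart r.1 r.2 ++ [',']) := by
  induction n generalizing xs x i with
  | zero =>
    have : xs = [] := List.length_eq_zero_iff.mp (Nat.le_zero.mp hn)
    subst this
    simp [pyGroupsA, PySem.List.enumerate_cons, PySem.List.enumerate_nil, runsFrom,
      renderGroupA, renderPart]
  | succ n ih =>
    rw [PySem.List.enumerate_cons, pyGroupsA]
    obtain ⟨htw, hdw⟩ := enumerate_takeDrop xs (i + 1) x (((i, x) : Int × Int).2 - (i, x).1)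
      (by simp; ring)
    rw [htw, hdw, runsFrom_eq xs x x]
    rw [List.map_cons, List.map_cons, renderGroup_of_run]
    congr 1
    cases hdr : dropRun x xs with
    | nil => simp [PySem.List.enumerate_nil, pyGroupsA]
    | cons y ys =>
      have hlen : ys.length ≤ n := by
        have h1 := length_dropRun_le x xs
        rw [hdr] at h1
        simp at h1
        omega
      exact ih ys y _ hlen

theorem toDigitsCore_no_comma (f n : Nat) (ds : List Char) (hds : ',' ∉ ds) :
    ',' ∉ Nat.toDigitsCore 10 f n ds := by
  induction f generalizing n ds with
  | zero => simpa [Nat.toDigitsCore] using hds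
  | succ f ih =>
    have hd : Nat.digitChar (n % 10) ≠ ',' := by
      have : n % 10 < 10 := Nat.mod_lt _ (by norm_num)
      interval_cases h : n % 10 <;> decide
    simp only [Nat.toDigitsCore]
    split
    · simp [hds, Ne.symm hd]
    · exact ih _ _ (by simp [hds, Ne.symm hd])

theorem toDigitsCore_ne_nil (f n : Nat) (ds : List Char) (hds : ds ≠ []) :
    Nat.toDigitsCore 10 f n ds ≠ [] := by
  induction f generalizing n ds with
  | zero => simpa [Nat.toDigitsCore] using hds
  | succ f ih =>
    simp only [Nat.toDigitsCore]
    split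
    · simp
    · exact ih _ _ (by simp)

theorem toChars_no_comma (n : Int) : ',' ∉ PySem.Int.toChars n := by
  unfold PySem.Int.toChars Nat.toDigits
  split
  · intro h
    rcases List.mem_cons.mp h with h | h
    · exact absurd h (by decide)
    · exact toDigitsCore_no_comma _ _ _ List.not_mem_nil h
  · exact toDigitsCore_no_comma _ _ _ List.not_mem_nil

theorem toDigitsCore_succ_ne_nil (f n : Nat) (ds : List Char) :
    Nat.toDigitsCore 10 (f + 1) n ds ≠ [] := by
  simp only [Nat.toDigitsCore]
  split
  · simp
  · exact toDigitsCore_ne_nil _ _ _ (by simp)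

theorem toChars_ne_nil (n : Int) : PySem.Int.toChars n ≠ [] := by
  unfold PySem.Int.toChars Nat.toDigits
  split
  · simp
  · exact toDigitsCore_succ_ne_nil _ _ _

theorem toChars_getLast? (n : Int) : (PySem.Int.toChars n).getLast? ≠ some ',' := by
  intro h
  exact toChars_no_comma n (List.mem_of_getLast? h)

theorem renderPart_ne_nil (s p : Int) : renderPart s p ≠ [] := by
  unfold renderPart; split
  · exact toChars_ne_nil s
  · simp

theorem renderPart_getLast? (s p : Int) : (renderPart s p).getLast? ≠ some ',' := by
  unfold renderPart; split
  · exact toChars_getLast? s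
  · rw [List.append_assoc, List.getLast?_append_of_ne_nil _ (by simp),
      List.getLast?_append_of_ne_nil _ (toChars_ne_nil p)]
    exact toChars_getLast? p

theorem rstripCommas_append_comma (pre : List Char) (h : pre.getLast? ≠ some ',') :
    rstripCommas (pre ++ [',']) = pre := by
  unfold rstripCommas
  rw [show (pre ++ [',']).reverse = ',' :: pre.reverse by simp]
  rw [List.dropWhile_cons, if_pos (by decide)]
  have hdw : List.dropWhile (fun x => x == ',') pre.reverse = pre.reverse := by
    cases hrev : pre.reverse with
    | nil => rfl
    | cons c t =>
      have hlast : pre.getLast? = some c := by rw [← List.head?_reverse, hrev]; rfl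
      have hc : c ≠ ',' := fun hh => h (by rw [hlast, hh])
      simp [hc]
  rw [hdw, List.reverse_reverse]

theorem join_concat (qs : List (List Char)) (p : List Char) (h : qs ≠ []) :
    PySem.Chars.join [','] (qs ++ [p]) = PySem.Chars.join [','] qs ++ [','] ++ p := by
  induction qs with
  | nil => cases h rfl
  | cons q qs ih =>
    cases qs with
    | nil => simp [PySem.Chars.join_cons_cons, PySem.Chars.join_singleton]
    | cons q' qs' =>
      rw [List.cons_append, List.cons_append, PySem.Chars.join_cons_cons,
        ← List.cons_append, ih (by simp), PySem.Chars.join_cons_cons]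
      simp [List.append_assoc]

theorem join_getLast? (ps : List (List Char))
    (hps : ps ≠ []) (hall : ∀ p ∈ ps, p ≠ [] ∧ p.getLast? ≠ some ',') :
    ('[' :: PySem.Chars.join [','] ps).getLast? ≠ some ',' := by
  rcases List.eq_nil_or_concat ps with rfl | ⟨qs, p, rfl⟩
  · cases hps rfl
  · rw [List.concat_eq_append]
    obtain ⟨hpne, hplast⟩ := hall p (by simp)
    cases qs with
    | nil =>
      rw [show ('[' :: PySem.Chars.join [','] ([] ++ [p])) = ['['] ++ p by
        simp [PySem.Chars.join_singleton]]
      rw [List.getLast?_append_of_ne_nil _ hpne]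
      exact hplast
    | cons q qs' =>
      rw [join_concat _ _ (by simp)]
      rw [show ('[' :: (PySem.Chars.join [','] (q :: qs') ++ [','] ++ p))
          = ('[' :: (PySem.Chars.join [','] (q :: qs') ++ [','])) ++ p by simp]
      rw [List.getLast?_append_of_ne_nil _ hpne]
      exact hplast

theorem flatten_map_comma (ps : List (List Char)) (h : ps ≠ []) :
    (ps.map (fun p => p ++ [','])).flatten = PySem.Chars.join [','] ps ++ [','] := by
  induction ps with
  | nil => cases h rfl
  | cons p ps ih =>
    cases ps with
    | nil => simp [PySem.Chars.join_singleton]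
    | cons q qs =>
      rw [List.map_cons, List.flatten_cons, ih (by simp), PySem.Chars.join_cons_cons]
      simp [List.append_assoc]

theorem foldl_append_render (l : List (List (Int × Int))) (a : List Char) :
    l.foldl (fun out g => out ++ renderGroupA g) a = a ++ (l.map renderGroupA).flatten := by
  induction l generalizing a with
  | nil => simp
  | cons g l ih => simp [ih, List.append_assoc]

-- ===== VERDICT (by name: the statement is the Claim_ definition above) =====
theorem ranges_and_strides_py_spec : Claim_equal_ranges_and_strides_py := by
  intro nums _
  unfold Spec_ranges_and_strides_py
  cases nums with
  | nil =>
    rw [ranges_and_strides_py, ranges_and_strides_py_alt, PySem.List.enumerate_nil, pyGroupsA]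
    rfl
  | cons x xs =>
    rw [ranges_and_strides_py, ranges_and_strides_py_alt, foldl_append_render,
      groupsA_eq_runs xs.length xs x 0 le_rfl]
    rw [show (runsFrom x x xs).map (fun r => renderPart r.1 r.2 ++ [','])
        = ((runsFrom x x xs).map (fun r => renderPart r.1 r.2)).map (fun p => p ++ [',']) by
      simp [List.map_map]]
    set ps := (runsFrom x x xs).map (fun r => renderPart r.1 r.2) with hps
    have hpsne : ps ≠ [] := by
      simp [hps, runsFrom_ne_nil]
    have hall : ∀ p ∈ ps, p ≠ [] ∧ p.getLast? ≠ some ',' := by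
      intro p hp
      rw [hps] at hp
      obtain ⟨r, _, rfl⟩ := List.mem_map.mp hp
      exact ⟨renderPart_ne_nil _ _, renderPart_getLast? _ _⟩
    rw [flatten_map_comma ps hpsne]
    rw [show (['['] ++ (PySem.Chars.join [','] ps ++ [',']))
        = ('[' :: PySem.Chars.join [','] ps) ++ [','] by simp]
    rw [rstripCommas_append_comma _ (join_getLast? ps hpsne hall)]
    rw [zip_breaks_eq_runs]
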